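-- pv_equiv track=rewrite | github.com/Kaliostro1983/main-report | src/reportgen/export/word_report.py | _normalize_callsign
-- ===== SOURCE A (Python) =====
-- def _normalize_callsign(s: str) -> str:
--     x = str(s).strip().upper()
--     x = x.replace(" ", "-")
--     for ch in ['"', "'", "«", "»", "[", "]", "(", ")", "–", "—"]:
--         x = x.replace(ch, "")
--     while "--" in x:
--         x = x.replace("--", "-")
--     return x
-- ===== SOURCE B (Python) =====
-- def _normalize_callsign(s: str) -> str:
--     # single pass: strip/upper once, then one traversal that drops removed
--     # chars, turns spaces into dashes, and suppresses a dash after a dash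
--     x = str(s).strip().upper()
--     out = []
--     for ch in x:
--         if ch in '"\'«»[]()–—':
--             continue
--         if ch == ' ':
--             ch = '-'
--         if ch == '-' and out and out[-1] == '-':
--             continue
--         out.append(ch)
--     return ''.join(out)
-- ===== Notes on version B (the rewrite author's own statement) =====
-- stated objective: alternative
-- what changed: Replaced the chain of replace passes (space-to-dash, ten removal passes, repeated '--'->'-' passes until fixpoint) by a single traversal that keeps the last emitted character as state, skipping removed chars, mapping spaces to dashes and suppressing a dash emitted right after a dash.
import Mathlib
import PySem

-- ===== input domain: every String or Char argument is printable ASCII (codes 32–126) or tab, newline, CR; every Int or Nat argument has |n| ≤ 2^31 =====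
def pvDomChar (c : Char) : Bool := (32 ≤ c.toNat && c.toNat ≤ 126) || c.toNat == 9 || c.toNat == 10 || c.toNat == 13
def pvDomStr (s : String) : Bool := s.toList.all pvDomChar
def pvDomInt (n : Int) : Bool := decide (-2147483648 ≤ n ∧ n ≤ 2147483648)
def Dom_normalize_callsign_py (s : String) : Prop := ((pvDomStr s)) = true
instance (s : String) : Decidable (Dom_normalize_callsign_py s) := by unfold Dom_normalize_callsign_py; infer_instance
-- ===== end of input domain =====

-- B replaces A's chain of replace passes and the '--'-collapse while-loop by one
-- traversal with the last-emitted character as state (alternative decomposition).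


-- ===== PORT A =====
-- the list of characters A removes, in A's order
def pvRemList : List Char := ['"', '\'', '«', '»', '[', ']', '(', ')', '–', '—']

-- the 'while "--" in x: x = x.replace("--", "-")' loop; fuel = current length
-- only makes the loop total (each iteration strictly shortens the string)
def pvCollapse : Nat → List Char → List Char
  | 0, l => l
  | Nat.succ n, l =>
      if PySem.Chars.isIn ['-', '-'] l then
        pvCollapse n (PySem.Chars.replace l ['-', '-'] ['-'])
      else l

def normalize_callsign_py (s : String) : String :=
  let x0 := PySem.Chars.upper (PySem.Chars.strip s.toList)
  let x1 := PySem.Chars.replace x0 [' '] ['-']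
  let x2 := pvRemList.foldl (fun a c => PySem.Chars.replace a [c] []) x1
  String.mk (pvCollapse x2.length x2)

-- ===== PORT B =====
-- the characters Source B's membership string '"\'«»[]()–—' holds
def pvRemChars : List Char := "\"'«»[]()–—".toList

def normalize_callsign_py_alt (s : String) : String :=
  let x := PySem.Chars.upper (PySem.Chars.strip s.toList)
  let out := x.foldl (fun out ch =>
      if pvRemChars.contains ch then out
      else
        let ch := if ch = ' ' then '-' else ch
        if ch = '-' && !out.isEmpty && (out.getLast? == some '-') then out
        else out ++ [ch]) []
  String.mk out

-- ===== PRECONDITION & SPEC =====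
def Spec_normalize_callsign_py (s : String) (out : String) : Prop := out = normalize_callsign_py_alt s
instance (s : String) (out : String) : Decidable (Spec_normalize_callsign_py s out) := by unfold Spec_normalize_callsign_py; infer_instance

-- ===== CLAIM (what is proved, stated in full; the proofs are below) =====
def Claim_equal_normalize_callsign_py : Prop := ∀ (s : String), Dom_normalize_callsign_py s → Spec_normalize_callsign_py s (normalize_callsign_py s)

-- ===== LEMMAS AND PROOFS =====

-- naive structural version of str.replace with a nonempty pattern o :: os
def pvRep (o : Char) (os new : List Char) : List Char → List Char
  | [] => []
  | c :: t =>
      if (o :: os).isPrefixOf (c :: t) then new ++ pvRep o os new (t.drop os.length)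
      else c :: pvRep o os new t
  termination_by l => l.length
  decreasing_by
    · simp only [List.length_drop, List.length_cons]; omega
    · simp only [List.length_cons]; omega

-- state machine: b = "last emitted character was '-'"
def pvDedS (b : Bool) : List Char → List Char
  | [] => []
  | c :: t =>
      if c = '-' then (if b then pvDedS true t else '-' :: pvDedS true t)
      else c :: pvDedS false t

theorem pvRep_go (o : Char) (os new : List Char) :
    ∀ (fuel : Nat) (l acc : List Char), l.length ≤ fuel →
      PySem.Chars.replace.go (o :: os) new fuel l acc = acc.reverse ++ pvRep o os new l := by
  intro fuel
  induction fuel with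
  | zero =>
      intro l acc h
      have : l = [] := List.eq_nil_of_length_eq_zero (Nat.le_zero.mp h)
      subst this
      simp [PySem.Chars.replace.go, pvRep]
  | succ n ih =>
      intro l acc h
      cases l with
      | nil => simp [PySem.Chars.replace.go, pvRep]
      | cons c t =>
          rw [PySem.Chars.replace.go]
          by_cases hp : (o :: os).isPrefixOf (c :: t) = true
      
          · rw [if_pos hp, pvRep, if_pos hp]
            have hlen : ((c :: t).drop (o :: os).length).length ≤ n := by
              simp only [List.length_drop, List.length_cons] at *
              omega
            have : (c :: t).drop (o :: os).length = t.drop os.length := by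
              simp
            rw [this] at hlen ⊢
            rw [ih _ _ hlen]
            simp
          · rw [if_neg hp, pvRep, if_neg hp]
            have hlen : t.length ≤ n := by
              simp only [List.length_cons] at h; omega
            rw [ih _ _ hlen]
            simp

theorem pvReplace_eq (o : Char) (os new l : List Char) :
    PySem.Chars.replace l (o :: os) new = pvRep o os new l := by
  rw [PySem.Chars.replace]
  simp only [List.isEmpty_cons]
  exact pvRep_go o os new l.length l [] (le_refl _)

-- replace of a single character by a single character is a map
theorem pvRep_map (a b : Char) (l : List Char) :
    pvRep a [] [b] l = l.map (fun c => if c = a then b else c) := by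
  induction l with
  | nil => simp [pvRep]
  | cons c t ih =>
      rw [pvRep]
      by_cases h : c = a
      · subst h
        rw [if_pos (by simp [List.isPrefixOf])]
        simp [ih]
      · rw [if_neg (by simp [List.isPrefixOf, h, Ne.symm])]
        simp [h, ih]

-- replace of a single character by the empty string is a filter
theorem pvRep_filter (a : Char) (l : List Char) :
    pvRep a [] [] l = l.filter (fun c => c != a) := by
  induction l with
  | nil => simp [pvRep]
  | cons c t ih =>
      rw [pvRep]
      by_cases h : c = a
      · subst h
        rw [if_pos (by simp [List.isPrefixOf])]
        simp [ih]
      · rw [if_neg (by simp [List.isPrefixOf, h, Ne.symm])]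
        simp [h, ih]

-- A's removal loop is a filter against the whole list
theorem pvFoldl_remove (ds : List Char) : ∀ l : List Char,
    ds.foldl (fun a c => PySem.Chars.replace a [c] []) l
      = l.filter (fun c => !ds.contains c) := by
  induction ds with
  | nil => intro l; simp
  | cons d ds ih =>
      intro l
      rw [List.foldl_cons, pvReplace_eq, pvRep_filter, ih, List.filter_filter]
      apply List.filter_congr
      intro c _
      by_cases h : c = d <;> simp [h]

-- the length of the string strictly drops on each pass of the while-loop
theorem pvRep2_len : ∀ l : List Char, (['-', '-'] <:+: l) →
    (pvRep '-' ['-'] ['-'] l).length < l.length := by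
  have hle : ∀ l : List Char, (pvRep '-' ['-'] ['-'] l).length ≤ l.length := by
    intro l
    induction l using pvRep.induct '-' ['-'] with
    | case1 => simp [pvRep]
    | case2 c t hp ih =>
        rw [pvRep, if_pos hp]
        simp only [List.length_append, List.length_cons, List.length_nil, List.length_drop, Nat.zero_add] at *
        have : t.length ≥ 1 := by
          cases t with
          | nil => simp [List.isPrefixOf] at hp
          | cons _ _ => simp
        omega
    | case3 c t hp ih =>
        rw [pvRep, if_neg hp]
        simp only [List.length_cons]; omega
  intro l
  induction l using pvRep.induct '-' ['-'] with
  | case1 => intro h; exact absurd h (by simp)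
  | case2 c t hp ih =>
      intro _
      rw [pvRep, if_pos hp]
      have := hle (t.drop 1)
      have ht : t.length ≥ 1 := by
        cases t with
        | nil => simp [List.isPrefixOf] at hp
        | cons _ _ => simp
      simp only [List.length_append, List.length_cons, List.length_nil, List.length_drop, Nat.zero_add] at *
      omega
  | case3 c t hp ih =>
      intro h
      rw [pvRep, if_neg hp]
      have ht : ['-', '-'] <:+: t := by
        rcases (List.infix_cons_iff).mp h with h1 | h2
        · exact absurd (List.isPrefixOf_iff_prefix.mpr h1) (by exact_mod_cast hp)
        · exact h2
      simp only [List.length_cons]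
      exact Nat.succ_lt_succ (ih ht)

-- one pass of the while-loop does not change the collapsed form
theorem pvDedS_rep2 : ∀ (n : Nat) (l : List Char), l.length ≤ n → ∀ b,
    pvDedS b (pvRep '-' ['-'] ['-'] l) = pvDedS b l := by
  intro n
  induction n with
  | zero =>
      intro l h b
      have : l = [] := List.eq_nil_of_length_eq_zero (Nat.le_zero.mp h)
      subst this; simp [pvRep]
  | succ n ih =>
      intro l h b
      cases l with
      | nil => simp [pvRep]
      | cons c t =>
          by_cases hp : (['-', '-'] : List Char).isPrefixOf (c :: t) = true
          · obtain ⟨hc, t', rfl⟩ : c = '-' ∧ ∃ t', t = '-' :: t' := by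
              cases t with
              | nil => simp [List.isPrefixOf] at hp
              | cons d t' =>
                  simp [List.isPrefixOf] at hp
                  exact ⟨hp.1.symm, t', by rw [← hp.2]⟩
            subst hc
            rw [pvRep, if_pos hp]
            have hlen : t'.length ≤ n := by
              simp only [List.length_cons] at h; omega
            cases b <;>
              simp [pvDedS, ih t' hlen]
          · rw [pvRep, if_neg hp]
            have hlen : t.length ≤ n := by
              simp only [List.length_cons] at h; omega
            by_cases hc : c = '-'
            · subst hc
              cases b <;> simp [pvDedS, ih t hlen]
            · cases b <;> simp [pvDedS, hc, ih t hlen]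

-- a string without "--" is already collapsed
theorem pvDedS_fixed : ∀ l : List Char, ¬ (['-', '-'] <:+: l) →
    pvDedS false l = l ∧ (l.head? ≠ some '-' → pvDedS true l = l) := by
  intro l
  induction l with
  | nil => intro _; exact ⟨rfl, fun _ => rfl⟩
  | cons c t ih =>
      intro h
      have hnp : ¬ (['-', '-'] <+: (c :: t)) := fun hp => h ((List.infix_cons_iff).mpr (Or.inl hp))
      have hnt : ¬ (['-', '-'] <:+: t) := fun ht => h ((List.infix_cons_iff).mpr (Or.inr ht))
      obtain ⟨ih1, ih2⟩ := ih hnt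
      by_cases hc : c = '-'
      · subst hc
        have hth : t.head? ≠ some '-' := by
          intro hh
          apply hnp
          cases t with
          | nil => simp at hh
          | cons d t' =>
              simp at hh
              subst hh
              exact ⟨t', rfl⟩
        refine ⟨?_, ?_⟩
        · simp [pvDedS, ih2 hth]
        · intro hh; simp at hh
      · exact ⟨by simp [pvDedS, hc, ih1], fun _ => by simp [pvDedS, hc, ih1]⟩

-- the whole while-loop computes the collapsed form (given enough fuel)
theorem pvCollapse_eq : ∀ (fuel : Nat) (l : List Char), l.length ≤ fuel →
    pvCollapse fuel l = pvDedS false l := by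
  intro fuel
  induction fuel with
  | zero =>
      intro l h
      have : l = [] := List.eq_nil_of_length_eq_zero (Nat.le_zero.mp h)
      subst this; rfl
  | succ n ih =>
      intro l h
      rw [pvCollapse]
      by_cases hin : PySem.Chars.isIn ['-', '-'] l = true
      · rw [if_pos hin, pvReplace_eq]
        have hinf : ['-', '-'] <:+: l := (PySem.Chars.isIn_iff_infix _ _).mp hin
        have hdec := pvRep2_len l hinf
        rw [ih _ (by omega)]
        exact pvDedS_rep2 l.length _ (by omega) false
      · rw [if_neg hin]
        have := (PySem.Chars.isIn_eq_false_iff _ _).mp (by simpa using hin)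
        exact (pvDedS_fixed l this).1.symm

-- space→dash mapping
def pvSp (c : Char) : Char := if c = ' ' then '-' else c

-- the removal predicate is untouched by the space→dash map
theorem pvFilter_map_comm (l : List Char) :
    (l.map pvSp).filter (fun c => !pvRemList.contains c)
      = (l.filter (fun c => !pvRemList.contains c)).map pvSp := by
  induction l with
  | nil => rfl
  | cons c t ih =>
      simp only [List.map_cons, List.filter_cons]
      have key : (!pvRemList.contains (pvSp c)) = (!pvRemList.contains c) := by
        by_cases h : c = ' '
        · subst h; decide
        · simp [pvSp, h]
      rw [key]
      by_cases hr : (!pvRemList.contains c) = true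
      · rw [if_pos hr, if_pos hr, List.map_cons, ih]
      · rw [if_neg hr, if_neg hr, ih]

-- B's filtered/mapped one-pass state machine
def pvGo (b : Bool) : List Char → List Char
  | [] => []
  | c :: t =>
      if pvRemChars.contains c then pvGo b t
      else
        let c' := if c = ' ' then '-' else c
        if c' = '-' && b then pvGo b t
        else c' :: pvGo (c' == '-') t

-- B's foldl unrolled against an accumulator
theorem pvFoldl_go : ∀ (l acc : List Char),
    l.foldl (fun out ch =>
        if pvRemChars.contains ch then out
        else
          let ch := if ch = ' ' then '-' else ch
          if ch = '-' && !out.isEmpty && (out.getLast? == some '-') then out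
          else out ++ [ch]) acc
      = acc ++ pvGo (acc.getLast? == some '-') l := by
  intro l
  induction l with
  | nil => intro acc; simp [pvGo]
  | cons c t ih =>
      intro acc
      rw [List.foldl_cons, ih, pvGo]
      by_cases hr : pvRemChars.contains c = true
      · rw [if_pos hr, if_pos hr]
      · rw [if_neg hr, if_neg hr]
        show (if (if c = ' ' then '-' else c) = '-' && !acc.isEmpty && (acc.getLast? == some '-') then acc
              else acc ++ [if c = ' ' then '-' else c]) ++ pvGo
                ((if (if c = ' ' then '-' else c) = '-' && !acc.isEmpty && (acc.getLast? == some '-') then acc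
                  else acc ++ [if c = ' ' then '-' else c]).getLast? == some '-') t
            = acc ++ (if (if c = ' ' then '-' else c) = '-' && (acc.getLast? == some '-') then pvGo (acc.getLast? == some '-') t
                else (if c = ' ' then '-' else c) :: pvGo ((if c = ' ' then '-' else c) == '-') t)
        generalize (if c = ' ' then '-' else c) = c'
        have hemp : (decide (c' = '-') && !acc.isEmpty && (acc.getLast? == some '-'))
            = (decide (c' = '-') && (acc.getLast? == some '-')) := by
          cases acc <;> simp
        rw [hemp]
        by_cases hb : (decide (c' = '-') && (acc.getLast? == some '-')) = true
        · rw [if_pos hb, if_pos hb]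
        · rw [if_neg hb, if_neg hb]
          rw [List.getLast?_append_cons]
          simp [List.append_assoc]

-- the one-pass machine is collapse ∘ map ∘ filter
theorem pvGo_eq : ∀ (l : List Char) (b : Bool),
    pvGo b l = pvDedS b ((l.filter (fun c => !pvRemChars.contains c)).map pvSp) := by
  intro l
  induction l with
  | nil => intro b; rfl
  | cons c t ih =>
      intro b
      rw [pvGo, List.filter_cons]
      by_cases hm : c ∈ pvRemChars
      · rw [if_pos (by simpa using hm)]
        rw [show (!pvRemChars.contains c) = false from by simpa using hm]
        rw [if_neg (by simp)]
        exact ih b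
      · rw [if_neg (by simpa using hm)]
        rw [show (!pvRemChars.contains c) = true from by simpa using hm]
        rw [if_pos rfl, List.map_cons]
        show (if (if c = ' ' then '-' else c) = '-' && b then pvGo b t
              else (if c = ' ' then '-' else c) :: pvGo ((if c = ' ' then '-' else c) == '-') t)
            = pvDedS b (pvSp c :: (t.filter (fun c => !pvRemChars.contains c)).map pvSp)
        rw [pvDedS]
        have hspc : pvSp c = (if c = ' ' then '-' else c) := rfl
        rw [hspc]
        by_cases hd : (if c = ' ' then '-' else c) = '-'
        · rw [hd]
          cases b
          · rw [if_neg (by simp), if_pos rfl, if_neg (by simp)]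
            simp [ih]
          · rw [if_pos (by simp), if_pos rfl, if_pos rfl]
            exact ih true
        · rw [if_neg hd, if_neg (by simp [hd])]
          rw [show ((if c = ' ' then '-' else c) == '-') = false from by simp [hd], ih false]

-- the two removal alphabets are the same list
theorem pvRem_eq : pvRemChars = pvRemList := by decide

-- ===== VERDICT (by name: the statement is the Claim_ definition above) =====
theorem normalize_callsign_py_spec : Claim_equal_normalize_callsign_py := by
  intro s _
  unfold Spec_normalize_callsign_py normalize_callsign_py normalize_callsign_py_alt
  simp only []
  rw [pvFoldl_go]
  set x := PySem.Chars.upper (PySem.Chars.strip s.toList) with hx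
  rw [pvCollapse_eq _ _ (le_refl _), pvFoldl_remove, pvReplace_eq, pvRep_map]
  rw [pvGo_eq, pvRem_eq]
  rw [show (fun c => if c = ' ' then '-' else c) = pvSp from rfl]
  rw [pvFilter_map_comm]
  rw [show ((List.getLast? ([] : List Char)) == some '-') = false from rfl]
  simp only [List.nil_append]
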